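-- pv_equiv track=rewrite | github.com/pypi-data/pypi-mirror-109 | packages/AsyncDex/AsyncDex-1.1-py3.9.egg/asyncdex/models/chapter_list.py | _check_values
-- ===== SOURCE A (Python) =====
-- def _check_values(set1: set, set2: set) -> int:
--     """This checks how many of the values present inside of the first set are in the second set."""
--     match = 0
--     if set1.issuperset(set2):
--         match += 1
--     for item in set2:
--         if set1.issuperset({item}):
--             match += 1
--     return match
-- ===== SOURCE B (Python) =====
-- def _check_values(set1: set, set2: set) -> int:
--     """This checks how many of the values present inside of the first set are in the second set."""
--     a = sorted(set1)
--     b = sorted(set2)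
--     i = j = inter = 0
--     while i < len(a) and j < len(b):
--         if a[i] < b[j]:
--             i += 1
--         elif b[j] < a[i]:
--             j += 1
--         else:
--             inter += 1
--             i += 1
--             j += 1
--     return inter + (1 if inter == len(b) else 0)
-- ===== Notes on version B (the rewrite author's own statement) =====
-- stated objective: alternative
-- what changed: B sorts both sets and counts the intersection with a two-pointer merge over the two sorted sequences, and derives the superset bonus arithmetically from inter == len(set2); it performs no membership tests and keeps no per-element hash lookups, unlike A's membership loop.
import Mathlib
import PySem

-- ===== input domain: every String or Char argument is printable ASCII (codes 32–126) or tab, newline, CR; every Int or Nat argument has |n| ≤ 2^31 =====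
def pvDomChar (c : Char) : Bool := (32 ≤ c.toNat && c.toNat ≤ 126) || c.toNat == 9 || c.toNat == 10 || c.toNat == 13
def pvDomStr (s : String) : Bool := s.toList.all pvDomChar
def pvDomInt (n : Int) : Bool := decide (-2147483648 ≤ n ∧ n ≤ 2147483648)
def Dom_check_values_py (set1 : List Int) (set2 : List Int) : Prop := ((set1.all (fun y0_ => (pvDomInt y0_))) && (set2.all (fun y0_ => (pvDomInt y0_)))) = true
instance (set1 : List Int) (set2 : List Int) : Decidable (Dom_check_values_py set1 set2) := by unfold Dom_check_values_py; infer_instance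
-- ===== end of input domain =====

-- B sorts both sets and counts the intersection by a two-pointer merge, deriving the superset bonus from inter == len(set2); equal to A on all nodup lists (the encoding of Python sets).


-- ===== PORT A =====
-- match = 0; if set1.issuperset(set2): match += 1; then for item in set2: if item ∈ set1: match += 1
def check_values_py (set1 : List Int) (set2 : List Int) : Int :=
  let match0 : Int := 0
  let match1 : Int := if set2.all (fun x => x ∈ set1) then match0 + 1 else match0
  set2.foldl (fun acc item => if item ∈ set1 then acc + 1 else acc) match1

-- ===== PORT B =====
-- the two-pointer merge over the two sorted lists (B's while loop, pointers as list suffixes)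
def cvMerge : List Int → List Int → Int
  | [], _ => 0
  | _, [] => 0
  | a :: as, b :: bs =>
    if a < b then cvMerge as (b :: bs)
    else if b < a then cvMerge (a :: as) bs
    else 1 + cvMerge as bs
termination_by x y => x.length + y.length

-- a = sorted(set1); b = sorted(set2); merge-count; then inter + (1 if inter == len(b) else 0)
def check_values_py_alt (set1 : List Int) (set2 : List Int) : Int :=
  let a := PySem.List.sorted set1 (fun x => x) false
  let b := PySem.List.sorted set2 (fun x => x) false
  let inter := cvMerge a b
  inter + (if inter == (b.length : Int) then 1 else 0)

-- ===== PRECONDITION & SPEC =====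
-- Both arguments are Python sets, encoded as lists of DISTINCT elements; Pre_ states that encoding invariant.
def Pre_check_values_py (set1 : List Int) (set2 : List Int) : Prop := set1.Nodup ∧ set2.Nodup
instance (set1 : List Int) (set2 : List Int) : Decidable (Pre_check_values_py set1 set2) := by unfold Pre_check_values_py; infer_instance
def pvWitness_check_values_py : List Int × List Int := ([1, 2, 3], [2, 3, 4])

def Spec_check_values_py (set1 : List Int) (set2 : List Int) (out : Int) : Prop := out = check_values_py_alt set1 set2
instance (set1 : List Int) (set2 : List Int) (out : Int) : Decidable (Spec_check_values_py set1 set2 out) := by unfold Spec_check_values_py; infer_instance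

-- ===== CLAIM (what is proved, stated in full; the proofs are below) =====
def Claim_equal_check_values_py : Prop := ∀ (set1 : List Int) (set2 : List Int), Dom_check_values_py set1 set2 → Pre_check_values_py set1 set2 → Spec_check_values_py set1 set2 (check_values_py set1 set2)

-- ===== LEMMAS AND PROOFS =====

-- A's counting loop adds one per member of set2 that is in set1.
theorem foldl_count_mem (set1 set2 : List Int) (m : Int) :
    set2.foldl (fun acc item => if item ∈ set1 then acc + 1 else acc) m
      = m + ((set2.filter (fun x => x ∈ set1)).length : Int) := by
  induction set2 generalizing m with
  | nil => simp
  | cons a t ih =>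
      simp only [List.foldl_cons, List.filter_cons]
      by_cases h : a ∈ set1
      · simp [h, ih]; ring
      · simp [h, ih]

-- On strictly increasing lists the merge counts exactly the members of b that occur in a.
theorem cvMerge_eq_filter (a b : List Int)
    (ha : a.Pairwise (· < ·)) (hb : b.Pairwise (· < ·)) :
    cvMerge a b = ((b.filter (fun x => x ∈ a)).length : Int) := by
  induction a, b using cvMerge.induct with
  | case1 b => simp [cvMerge]
  | case2 a => cases a <;> simp [cvMerge]
  | case3 x as y bs hxy ih =>
      -- x < y: y::bs are all ≥ y > x, so none of them equals x
      have hx : ∀ z ∈ y :: bs, z ∈ x :: as ↔ z ∈ as := by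
        intro z hz
        have hyz : y ≤ z := by
          rcases List.mem_cons.mp hz with h | h
          · omega
          · exact le_of_lt (List.rel_of_pairwise_cons hb h)
        constructor
        · intro h; rcases List.mem_cons.mp h with h | h
          · omega
          · exact h
        · exact fun h => List.mem_cons_of_mem _ h
      rw [cvMerge, if_pos hxy, ih (List.Pairwise.sublist (List.sublist_cons_self _ _) ha) hb]
      congr 1
      exact congrArg List.length
        (List.filter_congr (fun z hz => by simp [hx z hz])).symm
  | case4 x as y bs hxy hyx ih =>
      -- y < x: y is not in x::as, drop it
      have hy : y ∉ x :: as := by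
        intro h
        rcases List.mem_cons.mp h with h | h
        · omega
        · exact absurd (List.rel_of_pairwise_cons ha h) (by omega)
      rw [cvMerge, if_neg hxy, if_pos hyx,
        ih ha (List.Pairwise.sublist (List.sublist_cons_self _ _) hb)]
      have hy' : ¬(y = x ∨ y ∈ as) := by simpa [List.mem_cons] using hy
      simp [hy']
  | case5 x as y bs hxy hyx ih =>
      -- x = y: y matches the head; tails are all > y = x
      have hxy' : x = y := by omega
      have hmem : y ∈ x :: as := by simp [hxy']
      have hbs : ∀ z ∈ bs, z ∈ x :: as ↔ z ∈ as := by
        intro z hz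
        have : y < z := List.rel_of_pairwise_cons hb hz
        constructor
        · intro h; rcases List.mem_cons.mp h with h | h
          · omega
          · exact h
        · exact fun h => List.mem_cons_of_mem _ h
      rw [cvMerge, if_neg hxy, if_neg hyx,
        ih (List.Pairwise.sublist (List.sublist_cons_self _ _) ha)
           (List.Pairwise.sublist (List.sublist_cons_self _ _) hb)]
      have hlen2 : (List.filter (fun z => decide (z ∈ x :: as)) bs).length
           = (List.filter (fun z => decide (z ∈ as)) bs).length :=
        congrArg List.length (List.filter_congr (fun z hz => by simp [hbs z hz]))
      simp only [List.filter_cons, hmem, decide_true, if_true, List.length_cons]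
      rw [hlen2]
      push_cast
      ring

-- sorted(xs) of a nodup list is strictly increasing
theorem sorted_pairwise_lt (xs : List Int) (h : xs.Nodup) :
    (PySem.List.sorted xs (fun x => x) false).Pairwise (· < ·) := by
  have hle := PySem.List.sorted_pairwise (xs := xs) (key := fun x => x)
  have hnd : (PySem.List.sorted xs (fun x => x) false).Nodup :=
    (PySem.List.sorted_perm (xs := xs) (key := fun x => x) (rev := false)).nodup_iff.mpr h
  have := hle.and hnd
  exact this.imp (fun {a b} hab => lt_of_le_of_ne hab.1 hab.2)

-- filter count is invariant under sorting both lists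
theorem filter_sorted_count (set1 set2 : List Int) :
    (((PySem.List.sorted set2 (fun x => x) false).filter
        (fun x => x ∈ PySem.List.sorted set1 (fun x => x) false)).length : Int)
      = ((set2.filter (fun x => x ∈ set1)).length : Int) := by
  have h1 : ((PySem.List.sorted set2 (fun x => x) false).filter
        (fun x => x ∈ PySem.List.sorted set1 (fun x => x) false))
      = ((PySem.List.sorted set2 (fun x => x) false).filter (fun x => x ∈ set1)) := by
    apply List.filter_congr
    intro z _
    simp [PySem.List.mem_sorted]
  have h2 : ((PySem.List.sorted set2 (fun x => x) false).filter (fun x => x ∈ set1)).Perm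
      (set2.filter (fun x => x ∈ set1)) :=
    (PySem.List.sorted_perm (xs := set2) (key := fun x => x) (rev := false)).filter _
  rw [h1, h2.length_eq]

-- full members ↔ filter keeps everything
theorem all_iff_filter_len (set1 set2 : List Int) :
    (set2.all (fun x => x ∈ set1) = true)
      ↔ (set2.filter (fun x => x ∈ set1)).length = set2.length := by
  rw [List.length_filter_eq_length_iff]
  simp

-- ===== VERDICT (by name: the statement is the Claim_ definition above) =====
theorem check_values_py_spec : Claim_equal_check_values_py := by
  intro set1 set2 _ hpre
  unfold Spec_check_values_py check_values_py check_values_py_alt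
  simp only [foldl_count_mem,
    cvMerge_eq_filter _ _ (sorted_pairwise_lt _ hpre.1) (sorted_pairwise_lt _ hpre.2),
    filter_sorted_count, PySem.List.length_sorted]
  by_cases h : set2.all (fun x => x ∈ set1)
  · have := (all_iff_filter_len set1 set2).mp h
    simp [h, this]
    ring
  · have hne : (set2.filter (fun x => x ∈ set1)).length ≠ set2.length := by
      intro hc; exact h ((all_iff_filter_len set1 set2).mpr hc)
    have : ((set2.filter (fun x => x ∈ set1)).length : Int) ≠ (set2.length : Int) := by
      exact_mod_cast hne
    simp [h, this]
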